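-- pv_equiv track=rewrite | github.com/sveneggimann/SNIP | Python_Files/SNIP_functions.py | getAggregatedNodesinListWWTP
-- ===== SOURCE A (Python) =====
-- def breathSearch(ID, sewers):
--     """
--     This function searches all nodes flowing to a WWTP (a breath search of a graph).
--
--     Input Arguments:
--     ID                  --    ID
--     sewers              --    Sewer Network
--
--     Output Arguments:
--     allNodesToDelet     --    All nodes flowing to a wwtp
--     """
--     initialnetWorkToRemove, allNodesToDelet, newScrapList = ID, [], [ID]
--
--     while 1:
--         scrapList = newScrapList
--         newScrapList = []
--         # Search all nodes flowing to this wastewater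
--         for foundNode in scrapList:
--             for ID in sewers:
--                 if sewers[ID] != ():
--                     if sewers[ID][0] == foundNode:
--                         newScrapList.append(ID)
--                         allNodesToDelet.append(ID)
--         if len(newScrapList) == 0:
--             break
--     allNodesToDelet.append(initialnetWorkToRemove)  # Add initial WWTP
--     return allNodesToDelet
--
-- def getAggregatedNodesinListWWTP(WWTPs, pipeNetwork, aggregatedNodes):
--     """
--     This function makes a breath search for each wwtp to get nr of aggregated nodes to listWWTPs.
--
--     Input Arguments:
--     WWTPs                             --    list with WWTPs
--     pipeNetwork                       --    Sewer pipe network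
--
--     Output Arguments:
--     listWWTPwithAggregatedNodes       --    List with wwtp where the nr of aggregated nodes is added
--     """
--     listWWTPwithAggregatedNodes = []  # Form: ID, total Flow, total nr of aggregated nodes
--     for wwtp in WWTPs:
--         allNodes = breathSearch(wwtp[0], pipeNetwork)
--         nrOfNodes = 0           # List to store only inahbited nodes
--
--         # Because of arch points which are uninhabited
--         for node in allNodes:
--             for i in aggregatedNodes:
--                 if i[0] == node:
--                     nrOfNodes += 1
--                     break
--         listWWTPwithAggregatedNodes.append([wwtp[0], wwtp[1], nrOfNodes])
--
--     return listWWTPwithAggregatedNodes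
-- ===== SOURCE B (Python) =====
-- def getAggregatedNodesinListWWTP(WWTPs, pipeNetwork, aggregatedNodes):
--     # Precompute reverse adjacency (parent id -> list of pipe ids) and the set of
--     # aggregated-node heads once, then one BFS per WWTP with O(1) lookups,
--     # counting inhabited nodes on the fly.
--     children = {}
--     for k in pipeNetwork:
--         v = pipeNetwork[k]
--         if v != ():
--             children.setdefault(v[0], []).append(k)
--     heads = {i[0] for i in aggregatedNodes}
--     out = []
--     for wwtp in WWTPs:
--         wid = wwtp[0]
--         count = 1 if wid in heads else 0
--         frontier = [wid]
--         while True: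
--             nxt = [c for f in frontier for c in children.get(f, [])]
--             count += sum(1 for n in nxt if n in heads)
--             if not nxt:
--                 break
--             frontier = nxt
--         out.append([wid, wwtp[1], count])
--     return out
-- ===== Notes on version B (the rewrite author's own statement) =====
-- stated objective: faster
-- what changed: B precomputes a reverse-adjacency dict (parent -> pipe ids) and the set of aggregated-node heads once, then runs each WWTP's breadth search with O(1) dict/set lookups and counts inhabited nodes on the fly, instead of A's rescan of every pipe key per frontier node and rescan of aggregatedNodes per visited node.
-- outside the precondition, e.g. on getAggregatedNodesinListWWTP([(5, 1)], {}, [(5,), ()]): A returns [[5, 1, 1]], B raises IndexError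
import Mathlib
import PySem

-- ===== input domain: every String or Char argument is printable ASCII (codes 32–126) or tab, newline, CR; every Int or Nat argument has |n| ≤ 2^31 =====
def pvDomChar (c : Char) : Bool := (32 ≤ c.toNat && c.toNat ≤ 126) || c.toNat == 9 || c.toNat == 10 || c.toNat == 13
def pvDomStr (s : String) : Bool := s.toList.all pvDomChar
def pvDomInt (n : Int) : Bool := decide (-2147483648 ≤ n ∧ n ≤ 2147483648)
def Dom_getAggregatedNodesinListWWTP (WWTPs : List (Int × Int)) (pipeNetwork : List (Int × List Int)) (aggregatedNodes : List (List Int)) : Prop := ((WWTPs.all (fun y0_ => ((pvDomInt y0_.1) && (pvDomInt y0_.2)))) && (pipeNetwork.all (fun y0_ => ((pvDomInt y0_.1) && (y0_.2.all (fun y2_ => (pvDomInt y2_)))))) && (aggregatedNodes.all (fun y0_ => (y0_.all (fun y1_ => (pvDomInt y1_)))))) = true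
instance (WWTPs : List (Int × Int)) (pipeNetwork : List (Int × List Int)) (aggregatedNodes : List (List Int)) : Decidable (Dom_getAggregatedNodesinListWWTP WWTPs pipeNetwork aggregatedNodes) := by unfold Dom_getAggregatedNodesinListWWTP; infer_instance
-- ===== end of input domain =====

-- B precomputes the reverse-adjacency dict and the set of aggregated heads once and
-- counts during the BFS with O(1) lookups, instead of A's rescan of all pipes per
-- frontier node and rescan of aggregatedNodes per visited node (objective: faster).
-- ===== PORT A =====

-- shared reading of one dict entry: `some h` iff sewers[ID] != () and sewers[ID][0] = h
def pvParent? (d : PySem.Dict Int (List Int)) (k : Int) : Option Int :=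
  match PySem.Dict.get? d k with
  | some (h :: _) => some h
  | _ => none

-- one round of A's while-loop: "for foundNode in scrapList: for ID in sewers: …"
def pvLevelA (d : PySem.Dict Int (List Int)) (scrap : List Int) : List Int :=
  scrap.flatMap (fun fd => (PySem.Dict.keys d).filter (fun k => pvParent? d k == some fd))

-- A's `while 1` loop; the fuel `size d + 1` is a port artifact: wherever the Python
-- loop terminates (Pre_ below), it does so within that many rounds, so the port is
-- exact there (outside Pre_ the Python diverges and nothing is claimed).
def pvLoopA (d : PySem.Dict Int (List Int)) : Nat → List Int → List Int → List Int
  | 0, _, acc => acc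
  | fuel + 1, scrap, acc =>
    let new := pvLevelA d scrap
    if new = [] then acc else pvLoopA d fuel new (acc ++ new)

def pvBreathSearch (id : Int) (d : PySem.Dict Int (List Int)) : List Int :=
  pvLoopA d (PySem.Dict.size d + 1) [id] [] ++ [id]

-- A's inner scan with break: first i with i[0] == node, as a Boolean.
-- On i = [] Python raises IndexError (i[0]); Pre_ excludes that, the port skips i.
def pvScanAgg (agg : List (List Int)) (node : Int) : Bool :=
  match agg with
  | [] => false
  | i :: rest =>
    match i with
    | [] => pvScanAgg rest node
    | h :: _ => if h == node then true else pvScanAgg rest node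

def pvCountA (agg : List (List Int)) (nodes : List Int) : Int :=
  nodes.foldl (fun n node => if pvScanAgg agg node then n + 1 else n) 0

def getAggregatedNodesinListWWTP (WWTPs : List (Int × Int)) (pipeNetwork : List (Int × List Int)) (aggregatedNodes : List (List Int)) : List (List Int) :=
  let d := PySem.Dict.ofList pipeNetwork
  WWTPs.foldl (fun out w =>
    let allNodes := pvBreathSearch w.1 d
    let nrOfNodes := pvCountA aggregatedNodes allNodes
    out ++ [[w.1, w.2, nrOfNodes]]) []

-- ===== PORT B =====

-- children.setdefault(v[0], []).append(k)  =  insert v0 (getD v0 [] ++ [k])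
def pvChildren (d : PySem.Dict Int (List Int)) : PySem.Dict Int (List Int) :=
  (PySem.Dict.keys d).foldl (fun c k =>
    match pvParent? d k with
    | none => c
    | some p => PySem.Dict.insert c p (PySem.Dict.getD c p [] ++ [k])) PySem.Dict.empty

-- heads = {i[0] for i in aggregatedNodes}; on i = [] Python raises IndexError
-- (Pre_ excludes that), the port skips i.
def pvHeads (agg : List (List Int)) : PySem.Set Int :=
  agg.foldl (fun s i =>
    match i with
    | [] => s
    | h :: _ => PySem.Set.add s h) PySem.Set.empty

def pvCountLevel (heads : PySem.Set Int) (nodes : List Int) : Int :=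
  nodes.foldl (fun n x => if PySem.Set.contains heads x then n + 1 else n) 0

-- B's `while True` loop; same fuel artifact as pvLoopA (exact wherever Pre_ holds).
def pvLoopB (c : PySem.Dict Int (List Int)) (heads : PySem.Set Int) : Nat → List Int → Int → Int
  | 0, _, cnt => cnt
  | fuel + 1, frontier, cnt =>
    let new := frontier.flatMap (fun fd => PySem.Dict.getD c fd [])
    let cnt' := cnt + pvCountLevel heads new
    if new = [] then cnt' else pvLoopB c heads fuel new cnt'

def getAggregatedNodesinListWWTP_alt (WWTPs : List (Int × Int)) (pipeNetwork : List (Int × List Int)) (aggregatedNodes : List (List Int)) : List (List Int) :=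
  let d := PySem.Dict.ofList pipeNetwork
  let c := pvChildren d
  let heads := pvHeads aggregatedNodes
  WWTPs.map (fun w =>
    let cnt0 : Int := if PySem.Set.contains heads w.1 then 1 else 0
    [w.1, w.2, pvLoopB c heads (PySem.Dict.size d + 1) [w.1] cnt0])

-- ===== PRECONDITION & SPEC =====

-- m-th power of the pointer map k ↦ pipeNetwork[k][0] (none = chain leaves the dict);
-- a shape condition on the input graph, not a simulation of either port (the ports
-- iterate whole frontiers breadth-first, never a single pointer chain)
def pvIter (d : PySem.Dict Int (List Int)) (m : Nat) (k : Int) : Option Int :=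
  (fun o => Option.bind o (pvParent? d))^[m] (some k)

-- Pre_ excludes (a) inputs with a pointer cycle upstream of some WWTP id, on which the
-- Python A loops forever, and (b) inputs with an empty list in aggregatedNodes, on which
-- A raises IndexError at i[0] whenever such a list is scanned before a match (and is
-- slightly narrower there: if every scan happens to break on an earlier match A still
-- returns, but B's set comprehension {i[0] for i in aggregatedNodes} itself raises).
def Pre_getAggregatedNodesinListWWTP (WWTPs : List (Int × Int)) (pipeNetwork : List (Int × List Int)) (aggregatedNodes : List (List Int)) : Prop :=
  (∀ l ∈ aggregatedNodes, l ≠ []) ∧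
  ¬ ∃ w ∈ WWTPs, ∃ k ∈ PySem.Dict.keys (PySem.Dict.ofList pipeNetwork),
      (∃ m ∈ List.range (pipeNetwork.length + 1),
        pvIter (PySem.Dict.ofList pipeNetwork) (m + 1) k = some k) ∧
      (∃ m ∈ List.range (pipeNetwork.length + 1),
        pvIter (PySem.Dict.ofList pipeNetwork) m k = some w.1)

instance (WWTPs : List (Int × Int)) (pipeNetwork : List (Int × List Int)) (aggregatedNodes : List (List Int)) : Decidable (Pre_getAggregatedNodesinListWWTP WWTPs pipeNetwork aggregatedNodes) := by unfold Pre_getAggregatedNodesinListWWTP; infer_instance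

def pvWitness_getAggregatedNodesinListWWTP : (List (Int × Int)) × (List (Int × List Int)) × List (List Int) :=
  ([(1, 5)], [(2, [1]), (3, [2])], [[2], [3], [7]])

def Spec_getAggregatedNodesinListWWTP (WWTPs : List (Int × Int)) (pipeNetwork : List (Int × List Int)) (aggregatedNodes : List (List Int)) (out : List (List Int)) : Prop := out = getAggregatedNodesinListWWTP_alt WWTPs pipeNetwork aggregatedNodes
instance (WWTPs : List (Int × Int)) (pipeNetwork : List (Int × List Int)) (aggregatedNodes : List (List Int)) (out : List (List Int)) : Decidable (Spec_getAggregatedNodesinListWWTP WWTPs pipeNetwork aggregatedNodes out) := by unfold Spec_getAggregatedNodesinListWWTP; infer_instance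

-- ===== CLAIM (what is proved, stated in full; the proofs are below) =====
def Claim_equal_getAggregatedNodesinListWWTP : Prop := ∀ (WWTPs : List (Int × Int)) (pipeNetwork : List (Int × List Int)) (aggregatedNodes : List (List Int)), Dom_getAggregatedNodesinListWWTP WWTPs pipeNetwork aggregatedNodes → Pre_getAggregatedNodesinListWWTP WWTPs pipeNetwork aggregatedNodes → Spec_getAggregatedNodesinListWWTP WWTPs pipeNetwork aggregatedNodes (getAggregatedNodesinListWWTP WWTPs pipeNetwork aggregatedNodes)

-- ===== LEMMAS AND PROOFS =====

-- the reverse-adjacency dict looks up exactly A's inner key scan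
theorem pvChildren_aux (d : PySem.Dict Int (List Int)) (f : Int) (ks : List Int) (c : PySem.Dict Int (List Int)) :
    PySem.Dict.getD (ks.foldl (fun c k =>
      match pvParent? d k with
      | none => c
      | some p => PySem.Dict.insert c p (PySem.Dict.getD c p [] ++ [k])) c) f []
      = PySem.Dict.getD c f [] ++ ks.filter (fun k => pvParent? d k == some f) := by
  induction ks generalizing c with
  | nil => simp
  | cons k ks ih =>
    simp only [List.foldl_cons, List.filter_cons]
    cases hp : pvParent? d k with
    | none => simp [ih]
    | some p =>
      by_cases hf : f = p
      · subst hf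
        simp [ih, PySem.Dict.getD_insert_self]
      · rw [ih]
        simp [PySem.Dict.getD_insert, hf, Ne.symm hf]

theorem pvChildren_getD (d : PySem.Dict Int (List Int)) (f : Int) :
    PySem.Dict.getD (pvChildren d) f [] = (PySem.Dict.keys d).filter (fun k => pvParent? d k == some f) := by
  unfold pvChildren
  rw [pvChildren_aux]
  simp

theorem pvLevel_eq (d : PySem.Dict Int (List Int)) (scrap : List Int) :
    scrap.flatMap (fun fd => PySem.Dict.getD (pvChildren d) fd []) = pvLevelA d scrap := by
  unfold pvLevelA
  exact List.flatMap_congr (fun fd _ => pvChildren_getD d fd)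

-- head-set membership is exactly A's scan-with-break over aggregatedNodes
theorem pvHeads_mem (agg : List (List Int)) (node : Int) :
    PySem.Set.contains (pvHeads agg) node = pvScanAgg agg node := by
  have key : ∀ (agg : List (List Int)) (s : PySem.Set Int),
      PySem.Set.contains (agg.foldl (fun s i =>
        match i with
        | [] => s
        | h :: _ => PySem.Set.add s h) s) node
        = (PySem.Set.contains s node || pvScanAgg agg node) := by
    intro agg
    induction agg with
    | nil => intro s; simp [pvScanAgg]
    | cons i rest ih =>
      intro s
      cases i with
      | nil => simpa [pvScanAgg] using ih s
      | cons h t =>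
        rw [List.foldl_cons, ih]
        simp only [pvScanAgg]
        by_cases hh : h = node
        · subst hh
          simp [PySem.Set.mem_add]
        · simp [PySem.Set.mem_add, hh, Ne.symm hh]
  unfold pvHeads
  rw [key]
  simp

theorem pvCountLevel_eq (agg : List (List Int)) (nodes : List Int) :
    pvCountLevel (pvHeads agg) nodes = pvCountA agg nodes := by
  unfold pvCountLevel pvCountA
  have : (fun (n : Int) (x : Int) => if PySem.Set.contains (pvHeads agg) x then n + 1 else n)
      = (fun (n : Int) (x : Int) => if pvScanAgg agg x then n + 1 else n) := by
    funext n x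
    rw [pvHeads_mem]
  rw [this]

theorem pvCountA_shift (agg : List (List Int)) (nodes : List Int) (n0 : Int) :
    nodes.foldl (fun n node => if pvScanAgg agg node then n + 1 else n) n0
      = n0 + pvCountA agg nodes := by
  unfold pvCountA
  induction nodes generalizing n0 with
  | nil => simp
  | cons x xs ih =>
    simp only [List.foldl_cons]
    rw [ih, ih (if pvScanAgg agg x then 0 + 1 else 0)]
    by_cases h : pvScanAgg agg x <;> simp [h] <;> ring

theorem pvCountA_append (agg : List (List Int)) (a b : List Int) :
    pvCountA agg (a ++ b) = pvCountA agg a + pvCountA agg b := by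
  unfold pvCountA
  rw [List.foldl_append, pvCountA_shift]
  rfl

-- accumulator of A's loop just prefixes the result
theorem pvLoopA_acc (d : PySem.Dict Int (List Int)) (fuel : Nat) :
    ∀ (scrap acc : List Int), pvLoopA d fuel scrap acc = acc ++ pvLoopA d fuel scrap [] := by
  induction fuel with
  | zero => intro scrap acc; simp [pvLoopA]
  | succ f ih =>
    intro scrap acc
    simp only [pvLoopA]
    by_cases h : pvLevelA d scrap = []
    · simp [h]
    · simp only [h, if_false]
      rw [ih _ (acc ++ pvLevelA d scrap), ih _ ([] ++ pvLevelA d scrap)]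
      simp [List.append_assoc]

-- the two loops: B's running count is A's count of the nodes A collects
theorem pvLoop_eq (d : PySem.Dict Int (List Int)) (agg : List (List Int)) (fuel : Nat) :
    ∀ (scrap : List Int) (cnt : Int),
      pvLoopB (pvChildren d) (pvHeads agg) fuel scrap cnt
        = cnt + pvCountA agg (pvLoopA d fuel scrap []) := by
  induction fuel with
  | zero => intro scrap cnt; simp [pvLoopA, pvLoopB, pvCountA]
  | succ f ih =>
    intro scrap cnt
    simp only [pvLoopA, pvLoopB, pvLevel_eq d scrap, pvCountLevel_eq]
    by_cases h : pvLevelA d scrap = []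
    · simp [h, pvCountA]
    · simp only [h, if_false]
      rw [ih]
      conv_rhs => rw [List.nil_append, pvLoopA_acc]
      rw [pvCountA_append]
      ring

theorem pvElement_eq (d : PySem.Dict Int (List Int)) (agg : List (List Int)) (w : Int) :
    pvCountA agg (pvBreathSearch w d)
      = pvLoopB (pvChildren d) (pvHeads agg) (PySem.Dict.size d + 1) [w]
          (if PySem.Set.contains (pvHeads agg) w then 1 else 0) := by
  unfold pvBreathSearch
  rw [pvCountA_append, pvLoop_eq, pvHeads_mem]
  have : pvCountA agg [w] = if pvScanAgg agg w then 1 else 0 := by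
    unfold pvCountA
    by_cases h : pvScanAgg agg w <;> simp [h]
  rw [this]
  ring

-- ===== VERDICT (by name: the statement is the Claim_ definition above) =====
theorem getAggregatedNodesinListWWTP_spec : Claim_equal_getAggregatedNodesinListWWTP := by
  intro WWTPs pipeNetwork aggregatedNodes _ _
  unfold Spec_getAggregatedNodesinListWWTP getAggregatedNodesinListWWTP getAggregatedNodesinListWWTP_alt
  rw [PySem.List.foldl_append_singleton_eq_map]
  refine List.map_congr_left ?_
  intro w _
  simp only [pvElement_eq]
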